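-- pv_equiv track=rewrite | github.com/Kodiak03/text-to-gcode | text_to_gcode.py | modify_gcode
-- ===== SOURCE A (Python) =====
-- def modify_gcode(gcode):
--     # Split the input G-code into individual lines
--     lines = gcode.splitlines()
--
--     # Initialize a new list to store modified lines
--     modified_gcode = []
--
--     # Add M3 S75 at the start
--     modified_gcode.append("M3 S75")
--
--     # Loop through each line to process the G0 and G1 commands
--     previous_command = None  # To track the previous command for transitions
--
--     for line in lines:
--         # Check for G0 or G1 commands
--         if "G0" in line:
--             if previous_command == "G1":
--                 modified_gcode.append("M3 S75")  # Add M3 S75 before G0 if transitioning from G1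
--             modified_gcode.append(line)  # Add the G0 command
--             previous_command = "G0"  # Update the previous command
--         elif "G1" in line:
--             if previous_command == "G0":
--                 modified_gcode.append("M3 S90")  # Add M3 S90 before G1 if transitioning from G0
--             modified_gcode.append(line)  # Add the G1 command
--             previous_command = "G1"  # Update the previous command
--
--     # Add M3 S75 at the end
--     modified_gcode.append("M3 S75")
--
--     # Join the modified lines into a single string and return
--     return "\n".join(modified_gcode)
-- ===== SOURCE B (Python) =====
-- def modify_gcode(gcode):
--     # Two passes: classify the G0/G1 lines first, then insert transition markers
--     # between adjacent pairs of the filtered list.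
--     moves = [("G0" if "G0" in line else "G1", line)
--              for line in gcode.splitlines()
--              if "G0" in line or "G1" in line]
--     out = ["M3 S75"]
--     for (t0, l0), (t1, _) in zip(moves, moves[1:]):
--         out.append(l0)
--         if t0 != t1:
--             out.append("M3 S90" if t1 == "G1" else "M3 S75")
--     if moves:
--         out.append(moves[-1][1])
--     out.append("M3 S75")
--     return "\n".join(out)
-- ===== Notes on version B (the rewrite author's own statement) =====
-- stated objective: alternative
-- what changed: Replaces A's single stateful loop (tracking previous_command while appending) by two distinct passes: first classify/filter every line into a (type, line) list, then emit transition markers between adjacent pairs of that list via zip, plus the last line.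
import Mathlib
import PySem

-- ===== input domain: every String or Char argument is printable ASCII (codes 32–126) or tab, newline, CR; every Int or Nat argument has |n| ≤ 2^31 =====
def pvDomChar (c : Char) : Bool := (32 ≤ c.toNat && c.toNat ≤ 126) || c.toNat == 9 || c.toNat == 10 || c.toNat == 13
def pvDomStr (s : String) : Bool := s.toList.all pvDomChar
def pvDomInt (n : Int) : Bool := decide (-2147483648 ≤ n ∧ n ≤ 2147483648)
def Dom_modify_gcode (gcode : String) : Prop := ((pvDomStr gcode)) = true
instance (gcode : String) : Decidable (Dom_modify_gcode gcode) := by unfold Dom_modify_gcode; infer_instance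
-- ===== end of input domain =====

-- B replaces A's single stateful loop by a classify pass plus a pairwise transition pass (objective: alternative decomposition, same cost).

-- ===== PORT A =====
-- A's loop state: (modified_gcode so far, previous_command)
def modify_gcode (gcode : String) : String :=
  let lines := PySem.Str.splitlines gcode
  let r := lines.foldl (fun (st : List String × Option String) line =>
    if PySem.Str.isIn "G0" line then
      ((if st.2 = some "G1" then st.1 ++ ["M3 S75"] else st.1) ++ [line], some "G0")
    else if PySem.Str.isIn "G1" line then
      ((if st.2 = some "G0" then st.1 ++ ["M3 S90"] else st.1) ++ [line], some "G1")
    else st) (["M3 S75"], none)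
  PySem.Str.join "\n" (r.1 ++ ["M3 S75"])

-- ===== PORT B =====
-- classify pass: keep only G0/G1 lines, tagged with their type ("G0" checked first, as in Source B)
def pvClassify (lines : List String) : List (String × String) :=
  lines.filterMap (fun l =>
    if PySem.Str.isIn "G0" l then some ("G0", l)
    else if PySem.Str.isIn "G1" l then some ("G1", l)
    else none)

def modify_gcode_alt (gcode : String) : String :=
  let moves := pvClassify (PySem.Str.splitlines gcode)
  let out := (moves.zip moves.tail).foldl (fun out p =>
      let out := out ++ [p.1.2]
      if p.1.1 ≠ p.2.1 then out ++ [if p.2.1 = "G1" then "M3 S90" else "M3 S75"] else out)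
    ["M3 S75"]
  let out := match moves.getLast? with
    | some m => out ++ [m.2]
    | none => out
  PySem.Str.join "\n" (out ++ ["M3 S75"])

-- ===== PRECONDITION & SPEC =====
def Spec_modify_gcode (gcode : String) (out : String) : Prop := out = modify_gcode_alt gcode
instance (gcode : String) (out : String) : Decidable (Spec_modify_gcode gcode out) := by unfold Spec_modify_gcode; infer_instance

-- ===== CLAIM (what is proved, stated in full; the proofs are below) =====
def Claim_equal_modify_gcode : Prop := ∀ (gcode : String), Dom_modify_gcode gcode → Spec_modify_gcode gcode (modify_gcode gcode)

-- ===== LEMMAS AND PROOFS =====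

-- proof-only helpers: the common "middle" of both outputs, as a recursion over the classified list
def pvFlat : Option String → List (String × String) → List String
  | _, [] => []
  | prev, (t, l) :: rest =>
      (if t = "G0" then (if prev = some "G1" then ["M3 S75"] else [])
       else (if prev = some "G0" then ["M3 S90"] else [])) ++ [l] ++ pvFlat (some t) rest

-- A's fold, characterised: accumulator ++ flattened classified tail
theorem pvA_char (lines : List String) (acc : List String) (prev : Option String) :
    (lines.foldl (fun (st : List String × Option String) line =>
      if PySem.Str.isIn "G0" line then
        ((if st.2 = some "G1" then st.1 ++ ["M3 S75"] else st.1) ++ [line], some "G0")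
      else if PySem.Str.isIn "G1" line then
        ((if st.2 = some "G0" then st.1 ++ ["M3 S90"] else st.1) ++ [line], some "G1")
      else st) (acc, prev)).1 = acc ++ pvFlat prev (pvClassify lines) := by
  induction lines generalizing acc prev with
  | nil => simp [pvClassify, pvFlat]
  | cons l ls ih =>
    by_cases h0 : PySem.Str.isIn "G0" l = true
    · simp only [List.foldl_cons, h0, if_true, ih, pvClassify, List.filterMap_cons, pvFlat]
      split_ifs <;> simp_all [pvClassify]
    · by_cases h1 : PySem.Str.isIn "G1" l = true
      · simp only [List.foldl_cons, h0, h1, if_true, ih, pvClassify,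
          List.filterMap_cons]
        split_ifs <;> simp_all [pvClassify, pvFlat]
      · simp_all [List.foldl_cons, pvClassify]

-- every classified pair is tagged "G0" or "G1"
theorem pvClassify_tags (lines : List String) :
    ∀ p ∈ pvClassify lines, p.1 = "G0" ∨ p.1 = "G1" := by
  intro p hp
  simp only [pvClassify, List.mem_filterMap] at hp
  obtain ⟨l, -, hl⟩ := hp
  split_ifs at hl
  · injection hl with h; exact Or.inl (by rw [← h])
  · injection hl with h; exact Or.inr (by rw [← h])

-- B's pairwise pass, characterised on a nonempty classified list
theorem pvB_char (rest : List (String × String)) (t l : String) (out0 : List String)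
    (ht : t = "G0" ∨ t = "G1") (hrest : ∀ p ∈ rest, p.1 = "G0" ∨ p.1 = "G1") :
    (let moves := (t, l) :: rest
     let out := (moves.zip moves.tail).foldl (fun out p =>
        let out := out ++ [p.1.2]
        if p.1.1 ≠ p.2.1 then out ++ [if p.2.1 = "G1" then "M3 S90" else "M3 S75"] else out) out0
     match moves.getLast? with
     | some m => out ++ [m.2]
     | none => out) = out0 ++ [l] ++ pvFlat (some t) rest := by
  induction rest generalizing t l out0 with
  | nil => simp [pvFlat]
  | cons p rest' ih =>
    obtain ⟨t', l'⟩ := p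
    have ht' : t' = "G0" ∨ t' = "G1" := hrest (t', l') (by simp)
    have hrest' : ∀ p ∈ rest', p.1 = "G0" ∨ p.1 = "G1" := fun q hq => hrest q (by simp [hq])
    simp only [List.tail_cons, List.zip_cons_cons, List.foldl_cons, List.getLast?_cons_cons]
    have step := ih t' l'
      (out0 ++ [l] ++ (if t ≠ t' then [if t' = "G1" then "M3 S90" else "M3 S75"] else []))
      ht' hrest'
    simp only [List.tail_cons] at step ⊢
    rw [show (if (t, l).1 ≠ (t', l').1 then
          out0 ++ [(t, l).2] ++ [if (t', l').1 = "G1" then "M3 S90" else "M3 S75"]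
        else out0 ++ [(t, l).2]) =
        out0 ++ [l] ++ (if t ≠ t' then [if t' = "G1" then "M3 S90" else "M3 S75"] else [])
      by split_ifs <;> simp]
    rw [step, pvFlat]
    rcases ht with rfl | rfl <;> rcases ht' with rfl | rfl <;> simp

-- ===== VERDICT (by name: the statement is the Claim_ definition above) =====
theorem modify_gcode_spec : Claim_equal_modify_gcode := by
  intro gcode _
  unfold Spec_modify_gcode modify_gcode modify_gcode_alt
  simp only []
  rw [pvA_char]
  cases hm : pvClassify (PySem.Str.splitlines gcode) with
  | nil => simp [pvFlat]
  | cons m rest =>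
    obtain ⟨t, l⟩ := m
    have htags := pvClassify_tags (PySem.Str.splitlines gcode)
    rw [hm] at htags
    have := pvB_char rest t l ["M3 S75"] (htags (t, l) (by simp))
      (fun q hq => htags q (by simp [hq]))
    simp only at this
    rw [this]
    simp [pvFlat]
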